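-- pv_equiv track=rewrite | github.com/Aasthaengg/IBMdataset | Python_codes/p03827/s790023359.py | solve
-- ===== SOURCE A (Python) =====
-- def solve(N, S):
--     x = 0
--     xmax = 0
--     for s in S:
--         if s == "I":
--             x += 1
--             xmax = max(xmax, x)
--         else:
--              x -= 1
--     return xmax
-- ===== SOURCE B (Python) =====
-- def solve(N, S):
--     # max height = largest prefix balance (0 if no prefix is positive):
--     # compute each prefix's balance directly from its slice, then take the max with 0.
--     return max([0] + [sum(1 if c == "I" else -1 for c in S[:i + 1]) for i in range(len(S))])
-- ===== Notes on version B (the rewrite author's own statement) =====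
-- stated objective: alternative
-- what changed: Replaces the stateful running-sum-with-max-tracking loop by an explicit enumerate-all-prefixes formulation: each prefix balance is recomputed from its slice and the answer is max([0]+prefix balances); no running max or carried counter.
import Mathlib
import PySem

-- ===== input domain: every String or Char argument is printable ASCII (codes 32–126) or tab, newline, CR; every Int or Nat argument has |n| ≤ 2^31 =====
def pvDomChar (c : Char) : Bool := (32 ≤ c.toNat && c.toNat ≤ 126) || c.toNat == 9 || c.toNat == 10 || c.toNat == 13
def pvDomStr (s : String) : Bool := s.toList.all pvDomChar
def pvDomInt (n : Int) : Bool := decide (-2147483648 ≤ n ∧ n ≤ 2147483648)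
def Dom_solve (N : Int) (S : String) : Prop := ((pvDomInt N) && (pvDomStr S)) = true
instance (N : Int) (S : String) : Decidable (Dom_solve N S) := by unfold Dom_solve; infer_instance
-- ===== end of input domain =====

-- B replaces A's running-sum-with-max loop by an explicit all-prefix-balances enumeration; alternative decomposition, same return values.

-- ===== PORT A =====
-- literal port: fold over the characters carrying (x, xmax)
def solve (N : Int) (S : String) : Int :=
  (S.toList.foldl
    (fun (p : Int × Int) s =>
      if s = 'I' then (p.1 + 1, max p.2 (p.1 + 1)) else (p.1 - 1, p.2))
    (0, 0)).2

-- ===== PORT B =====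
-- literal port of Source B: max([0] + [sum(±1 over S[:i+1]) for i in range(len S)]);
-- S[:i+1] with 0 ≤ i < len S is exactly List.take (i+1); Python's left-to-right max of [0]+xs is foldl max 0 xs.
def solve_alt (N : Int) (S : String) : Int :=
  List.foldl max 0
    ((List.range S.toList.length).map
      (fun i => ((S.toList.take (i + 1)).map (fun c => if c = 'I' then (1 : Int) else -1)).sum))

-- ===== PRECONDITION & SPEC =====
def Spec_solve (N : Int) (S : String) (out : Int) : Prop := out = solve_alt N S
instance (N : Int) (S : String) (out : Int) : Decidable (Spec_solve N S out) := by unfold Spec_solve; infer_instance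

-- ===== CLAIM (what is proved, stated in full; the proofs are below) =====
def Claim_equal_solve : Prop := ∀ (N : Int) (S : String), Dom_solve N S → Spec_solve N S (solve N S)

-- ===== LEMMAS AND PROOFS =====

def pvDelta (c : Char) : Int := if c = 'I' then 1 else -1

-- running prefix balances starting from x
def pvPref (x : Int) : List Char → List Int
  | [] => []
  | c :: t => (x + pvDelta c) :: pvPref (x + pvDelta c) t

lemma pvFoldA (l : List Char) : ∀ (x m : Int), x ≤ m →
    (l.foldl (fun (p : Int × Int) s =>
      if s = 'I' then (p.1 + 1, max p.2 (p.1 + 1)) else (p.1 - 1, p.2)) (x, m)).2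
    = List.foldl max m (pvPref x l) := by
  induction l with
  | nil => intro x m _; simp [pvPref]
  | cons c t ih =>
    intro x m hxm
    by_cases hc : c = 'I'
    · subst hc
      simp only [List.foldl_cons, pvPref, pvDelta]
      exact ih (x + 1) (max m (x + 1)) (le_max_right _ _)
    · simp only [List.foldl_cons, pvPref, pvDelta, if_neg hc, ← sub_eq_add_neg]
      rw [ih (x - 1) m (by omega)]
      have : max m (x - 1) = m := by omega
      rw [this]

lemma pvPrefEq (l : List Char) : ∀ (x : Int),
    pvPref x l = (List.range l.length).map (fun i => x + ((l.take (i + 1)).map pvDelta).sum) := by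
  induction l with
  | nil => intro x; simp [pvPref]
  | cons c t ih =>
    intro x
    rw [List.length_cons, List.range_succ_eq_map]
    simp only [pvPref, List.map_cons, List.map_map, List.take_succ_cons, List.map, List.sum_cons]
    congr 1
    · simp
    · rw [ih (x + pvDelta c)]
      apply List.map_congr_left
      intro i _
      simp [Function.comp]
      ring

-- ===== VERDICT (by name: the statement is the Claim_ definition above) =====
theorem solve_spec : Claim_equal_solve := by
  intro N S _
  unfold Spec_solve solve solve_alt
  rw [pvFoldA S.toList 0 0 le_rfl, pvPrefEq]
  have : (fun i => (0:Int) + ((S.toList.take (i + 1)).map pvDelta).sum)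
       = (fun i => ((S.toList.take (i + 1)).map (fun c => if c = 'I' then (1:Int) else -1)).sum) := by
    funext i
    rw [show pvDelta = (fun c => if c = 'I' then (1:Int) else -1) from rfl]
    ring
  rw [this]
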